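-- pv_equiv track=rewrite | github.com/mazariks/ITI0102 | iti0102-2020-master/EX/ex03_booksortation/booksortation.py | is_history_book
-- ===== SOURCE A (Python) =====
-- def is_history_book(book: str) -> bool:
--     """
--     Book is a history book if its title matches the pattern where each new word starts with a capital letter.
--
--     Word is considered anything after a whitespace.
--
--     For example: 'The Mighty King' and 'The Age Of The Wonderbolts' are both history books.
--     Then again, 'the Ugly Duckling' isn't a history books because the word 'the' doesn't start with a capital letter.
--
--     :param book: given book as a string
--     :return: True if given book is a history book, False otherwise
--     """
--     alphabet = ['a', 'b', 'c', 'd', 'e', 'f', 'g', 'h', 'i', 'j', 'k', 'l', 'm', 'n', 'o', 'p', 'q', 'r', 's', 't', 'u',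
--                 'v', 'w', 'x', 'y', 'z', 'ä', 'ü', 'õ', 'ö']
--     new_list = []
--     splitted_book = book.split()
--     for i in splitted_book:
--         if i[0].isupper() or i[0] not in alphabet:
--             new_list.append(i)
--     if len(new_list) == len(splitted_book):
--         return True
--     return False
-- ===== SOURCE B (Python) =====
-- def is_history_book(book: str) -> bool:
--     """Single char-scan with a word-start flag instead of building a word list."""
--     alphabet = "abcdefghijklmnopqrstuvwxyz\u00e4\u00fc\u00f5\u00f6"
--     at_word_start = True
--     for c in book:
--         if c.isspace():
--             at_word_start = True
--         elif at_word_start: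
--             if not c.isupper() and c in alphabet:
--                 return False
--             at_word_start = False
--     return True
-- ===== Notes on version B (the rewrite author's own statement) =====
-- stated objective: simpler
-- what changed: B scans characters once with a word-start boolean flag (early return on a failing word-start character) instead of splitting into a word list, building a filtered second list and comparing lengths.
import Mathlib
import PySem

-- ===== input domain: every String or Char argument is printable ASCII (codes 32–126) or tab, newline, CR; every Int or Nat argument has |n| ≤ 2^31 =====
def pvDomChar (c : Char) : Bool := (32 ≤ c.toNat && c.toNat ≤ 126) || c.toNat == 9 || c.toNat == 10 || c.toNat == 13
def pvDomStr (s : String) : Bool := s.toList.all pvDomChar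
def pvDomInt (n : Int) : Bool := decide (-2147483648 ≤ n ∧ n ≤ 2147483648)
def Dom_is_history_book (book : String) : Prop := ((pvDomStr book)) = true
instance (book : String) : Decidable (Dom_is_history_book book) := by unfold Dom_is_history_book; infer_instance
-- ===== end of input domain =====

-- B replaces A's split/filter/length-compare with a single character scan keeping a
-- word-start flag; objective: simpler (same O(n) cost, no intermediate lists).

-- the shared literal constant 'alphabet' of both Pythons
def pvAlphabet : List Char :=
  ['a','b','c','d','e','f','g','h','i','j','k','l','m','n','o','p','q','r','s','t','u',
   'v','w','x','y','z','ä','ü','õ','ö']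

-- ===== PORT A =====
-- i[0] is ported as i.headI: words produced by str.split() are never empty, so Python never raises here
def is_history_book (book : String) : Bool :=
  let splitted_book := PySem.Chars.split₀ book.toList
  let new_list := splitted_book.foldl
    (fun acc i =>
      if PySem.Chars.isupper i.headI || !(pvAlphabet.contains i.headI) then acc ++ [i] else acc)
    ([] : List (List Char))
  if new_list.length = splitted_book.length then true else false

-- ===== PORT B =====
def goAlt : List Char → Bool → Bool
  | [], _ => true
  | c :: rest, atWordStart =>
    if PySem.Chars.isspace c then goAlt rest true
    else if atWordStart then
      if !PySem.Chars.isupper c && pvAlphabet.contains c then false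
      else goAlt rest false
    else goAlt rest atWordStart

def is_history_book_alt (book : String) : Bool := goAlt book.toList true

-- ===== PRECONDITION & SPEC =====
def Spec_is_history_book (book : String) (out : Bool) : Prop := out = is_history_book_alt book
instance (book : String) (out : Bool) : Decidable (Spec_is_history_book book out) := by unfold Spec_is_history_book; infer_instance

-- ===== CLAIM (what is proved, stated in full; the proofs are below) =====
def Claim_equal_is_history_book : Prop := ∀ (book : String), Dom_is_history_book book → Spec_is_history_book book (is_history_book book)

-- ===== LEMMAS AND PROOFS =====

-- A's per-word predicate, applied to the first character
def pvP (w : List Char) : Bool :=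
  PySem.Chars.isupper w.headI || !(pvAlphabet.contains w.headI)

-- the split₀ accumulator invariant: cur is the reversed current word, cur.isEmpty ↔ at word start
lemma pv_key (cs : List Char) : ∀ (cur : List Char) (acc : List (List Char)),
    ((PySem.Chars.split₀.go cs cur acc).all pvP)
      = ((acc.all pvP) && (cur.isEmpty || pvP cur.reverse) && goAlt cs cur.isEmpty) := by
  induction cs with
  | nil =>
    intro cur acc
    cases cur with
    | nil => simp [PySem.Chars.split₀.go, goAlt, List.all_reverse]
    | cons c cur' =>
      simp [PySem.Chars.split₀.go, goAlt, List.all_reverse, Bool.and_comm]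
  | cons c rest ih =>
    intro cur acc
    by_cases hs : PySem.Chars.isspace c = true
    · cases cur with
      | nil => simp [PySem.Chars.split₀.go, hs, goAlt, ih]
      | cons d cur' =>
        simp only [PySem.Chars.split₀.go, hs, if_true, List.isEmpty_cons, if_false,
          Bool.false_eq_true, ih, goAlt]
        simp [Bool.and_comm]
    · cases cur with
      | nil =>
        by_cases hu : PySem.Chars.isupper c = true <;> by_cases hm : c ∈ pvAlphabet <;>
          simp [PySem.Chars.split₀.go, hs, ih, goAlt, pvP, hu, hm, Bool.and_comm]
      | cons d cur' =>
        simp only [PySem.Chars.split₀.go, hs, if_false, ih, goAlt, List.isEmpty_cons,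
          Bool.false_eq_true, if_false, Bool.false_or]
        have : pvP (c :: d :: cur').reverse = pvP (d :: cur').reverse := by
          simp only [pvP, List.reverse_cons]
          rw [show cur'.reverse ++ [d] ++ [c] = cur'.reverse ++ [d, c] by simp]
          cases hr : cur'.reverse <;> simp
        rw [this]

-- A's filtered-list test equals the all-words test
lemma pv_A_eq_all (book : String) :
    is_history_book book = (PySem.Chars.split₀ book.toList).all pvP := by
  show (if ((PySem.Chars.split₀ book.toList).foldl
      (fun acc i => if PySem.Chars.isupper i.headI || !(pvAlphabet.contains i.headI)
        then acc ++ [i] else acc) []).length = (PySem.Chars.split₀ book.toList).length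
      then true else false) = _
  rw [show (fun (acc : List (List Char)) (i : List Char) =>
        if PySem.Chars.isupper i.headI || !(pvAlphabet.contains i.headI) then acc ++ [i] else acc)
      = (fun acc i => if pvP i then acc ++ [id i] else acc) from rfl,
    PySem.List.foldl_append_if pvP id, List.map_id, List.nil_append]
  by_cases h : (PySem.Chars.split₀ book.toList).all pvP = true
  · rw [List.filter_eq_self.mpr (by simpa [List.all_eq_true] using h)]
    simp [h]
  · have hlt : ((PySem.Chars.split₀ book.toList).filter pvP).length
        < (PySem.Chars.split₀ book.toList).length := by
      rw [List.length_filter_lt_length_iff_exists]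
      simpa [List.all_eq_true] using h
    simp [Nat.ne_of_lt hlt, h]

-- ===== VERDICT (by name: the statement is the Claim_ definition above) =====
theorem is_history_book_spec : Claim_equal_is_history_book := by
  intro book _
  show is_history_book book = is_history_book_alt book
  rw [pv_A_eq_all book]
  have := pv_key book.toList [] []
  simpa [PySem.Chars.split₀, is_history_book_alt] using this
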